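-- pv_equiv track=rewrite | github.com/Kaimary/MetaSQL | utils/sql_utils.py | split_into_clauses
-- ===== SOURCE A (Python) =====
-- CLS_TOKENS = ['SELECT', 'FROM', 'WHERE', 'GROUP', 'ORDER']
--
-- def split_into_clauses(sql):
--     """
--     Split SQL into clauses(select/from/where/groupby/orderby).
--
--     :param sql: sql string
--     :return: sql clause strings
--     """
--
--     select_ = ""
--     from_   = ""
--     where_ = ""
--     group_ = ""
--     order_ = ""
--
--     split_indice = []
--     tokens = sql.split()
--     left_brackets = 0
--     for idx, t in enumerate(tokens):
--         if '(' in t: left_brackets += 1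
--         if ')' in t: left_brackets -= 1
--         if any(tt in t for tt in CLS_TOKENS) and left_brackets == 0:
--             split_indice.append(idx)
--     split_indice.append(len(tokens))
--
--     assert split_indice[0] == 0
--     start = 0
--     for i in split_indice[1:]:
--         if CLS_TOKENS[0] in tokens[start]: select_ = ' '.join(tokens[start: i])
--         elif CLS_TOKENS[1] in tokens[start]: from_ = ' '.join(tokens[start: i])
--         elif CLS_TOKENS[2] in tokens[start]: where_ = ' '.join(tokens[start: i])
--         elif CLS_TOKENS[3] in tokens[start]: group_ = ' '.join(tokens[start: i])
--         elif CLS_TOKENS[4] in tokens[start]: order_ = ' '.join(tokens[start: i])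
--         start = i
--
--     return select_, from_, where_,  group_, order_
-- ===== SOURCE B (Python) =====
-- CLS_TOKENS = ['SELECT', 'FROM', 'WHERE', 'GROUP', 'ORDER']
--
-- def split_into_clauses(sql):
--     """Label-and-group pipeline: stage 1 labels every token with its segment
--     number, stage 2 groups the tokens by label, stage 3 assigns each group to
--     the clause slot of the first CLS token found in the group's head token."""
--     tokens = sql.split()
--
--     # stage 1: label each token with its segment number
--     labels = []
--     depth = 0
--     seg = -1
--     for t in tokens:
--         depth += ('(' in t) - (')' in t)
--         if depth == 0 and any(k in t for k in CLS_TOKENS):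
--             seg += 1
--         labels.append(seg)
--     assert not tokens or labels[0] == 0
--
--     # stage 2: group the tokens by label
--     groups = {}
--     for t, l in zip(tokens, labels):
--         groups[l] = groups.get(l, []) + [t]
--
--     # stage 3: assign each group to the slot of its head's first CLS token
--     clauses = ["", "", "", "", ""]
--     for g in groups.values():
--         for i, k in enumerate(CLS_TOKENS):
--             if k in g[0]:
--                 clauses[i] = ' '.join(g)
--                 break
--     return tuple(clauses)
-- ===== Notes on version B (the rewrite author's own statement) =====
-- stated objective: alternative
-- what changed: A collects depth-0 boundary indices into a list and then re-walks that index list slicing tokens[start:i] with a five-way elif chain; B is a label-and-group pipeline: it labels every token with its segment number, groups the tokens by label in a dict, and assigns each group's joined tokens to the clause slot of the first CLS token in the group's head.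
import Mathlib
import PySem

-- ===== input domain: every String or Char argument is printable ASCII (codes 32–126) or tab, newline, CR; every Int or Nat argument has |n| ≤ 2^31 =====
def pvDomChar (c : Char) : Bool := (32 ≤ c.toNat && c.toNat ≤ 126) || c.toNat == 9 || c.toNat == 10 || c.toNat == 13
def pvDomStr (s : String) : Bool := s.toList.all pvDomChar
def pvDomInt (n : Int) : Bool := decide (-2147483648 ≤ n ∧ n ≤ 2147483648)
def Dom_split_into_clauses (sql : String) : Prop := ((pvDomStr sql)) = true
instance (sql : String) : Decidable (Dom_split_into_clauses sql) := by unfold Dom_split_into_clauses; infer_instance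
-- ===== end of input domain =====

-- B replaces A's boundary-index collection + index-slicing elif chain by a three-stage
-- label-and-group pipeline (label every token with its segment number, group tokens by
-- label in a dict, assign each group to its clause slot); objective: alternative, same cost.

-- ===== PORT A =====
abbrev R5 := String × String × String × String × String

def clsTokens : List String := ["SELECT", "FROM", "WHERE", "GROUP", "ORDER"]

-- A's first loop: enumerate(tokens), tracking left_brackets, appending boundary indices
def aIndexLoop : List String → Nat → Int → List Nat → List Nat
  | [], _, _, acc => acc
  | t :: ts, idx, lb, acc =>
    let lb := if PySem.Str.isIn "(" t then lb + 1 else lb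
    let lb := if PySem.Str.isIn ")" t then lb - 1 else lb
    let acc := if clsTokens.any (fun tt => PySem.Str.isIn tt t) && (lb == 0) then acc ++ [idx] else acc
    aIndexLoop ts (idx + 1) lb acc

-- A's elif chain over CLS_TOKENS[0] … CLS_TOKENS[4] on tokens[start]
def aAssign (r : R5) (head seg : String) : R5 :=
  if PySem.Str.isIn "SELECT" head then (seg, r.2.1, r.2.2.1, r.2.2.2.1, r.2.2.2.2)
  else if PySem.Str.isIn "FROM" head then (r.1, seg, r.2.2.1, r.2.2.2.1, r.2.2.2.2)
  else if PySem.Str.isIn "WHERE" head then (r.1, r.2.1, seg, r.2.2.2.1, r.2.2.2.2)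
  else if PySem.Str.isIn "GROUP" head then (r.1, r.2.1, r.2.2.1, seg, r.2.2.2.2)
  else if PySem.Str.isIn "ORDER" head then (r.1, r.2.1, r.2.2.1, r.2.2.2.1, seg)
  else r

-- A's second loop: for i in split_indice[1:], assign ' '.join(tokens[start:i]), start = i
def aClauseLoop (toks : List String) : List Nat → Nat → R5 → R5
  | [], _, r => r
  | i :: is, start, r =>
    aClauseLoop toks is i
      (aAssign r (toks.getD start "")
        (PySem.Str.join " " (PySem.List.slice toks (some (start : Int)) (some (i : Int)))))

def split_into_clauses (sql : String) : String × String × String × String × String :=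
  let tokens := PySem.Str.split₀ sql
  let split_indice := aIndexLoop tokens 0 0 [] ++ [tokens.length]
  -- assert split_indice[0] == 0  — raises exactly outside Pre_split_into_clauses
  aClauseLoop tokens (split_indice.drop 1) 0 ("", "", "", "", "")

-- ===== PORT B =====
-- stage 1: label each token with its segment number
def bLabelLoop : List String → Int → Int → List Int → List Int
  | [], _, _, labels => labels
  | t :: ts, depth, seg, labels =>
    let depth := depth + (if PySem.Str.isIn "(" t then (1 : Int) else 0)
                       - (if PySem.Str.isIn ")" t then (1 : Int) else 0)
    let seg := if (depth == 0) && clsTokens.any (fun k => PySem.Str.isIn k t) then seg + 1 else seg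
    bLabelLoop ts depth seg (labels ++ [seg])

-- stage 2: group the tokens by label (groups[l] = groups.get(l, []) + [t])
def bGroupLoop : List (String × Int) → PySem.Dict Int (List String) → PySem.Dict Int (List String)
  | [], groups => groups
  | (t, l) :: rest, groups => bGroupLoop rest (groups.insert l (groups.getD l [] ++ [t]))

-- clauses[i] = v on the 5-slot clause list
def setSlot (r : R5) (i : Nat) (v : String) : R5 :=
  match i with
  | 0 => (v, r.2.1, r.2.2.1, r.2.2.2.1, r.2.2.2.2)
  | 1 => (r.1, v, r.2.2.1, r.2.2.2.1, r.2.2.2.2)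
  | 2 => (r.1, r.2.1, v, r.2.2.2.1, r.2.2.2.2)
  | 3 => (r.1, r.2.1, r.2.2.1, v, r.2.2.2.2)
  | 4 => (r.1, r.2.1, r.2.2.1, r.2.2.2.1, v)
  | _ => r

-- stage 3 inner loop: first CLS token contained in the group's head g[0] wins
def bSlotLoop : List String → Nat → R5 → List String → R5
  | [], _, clauses, _ => clauses
  | k :: ks, i, clauses, g =>
    if PySem.Str.isIn k ((PySem.List.pyGet? g 0).getD "") then
      setSlot clauses i (PySem.Str.join " " g)
    else bSlotLoop ks (i + 1) clauses g

-- stage 3 outer loop: for g in groups.values()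
def bValuesLoop : List (List String) → R5 → R5
  | [], clauses => clauses
  | g :: gs, clauses => bValuesLoop gs (bSlotLoop clsTokens 0 clauses g)

def split_into_clauses_alt (sql : String) : String × String × String × String × String :=
  let tokens := PySem.Str.split₀ sql
  let labels := bLabelLoop tokens 0 (-1) []
  -- assert not tokens or labels[0] == 0  — raises exactly outside Pre_split_into_clauses
  let groups := bGroupLoop (tokens.zip labels) (PySem.Dict.mk [])
  bValuesLoop groups.values ("", "", "", "", "")

-- ===== PRECONDITION & SPEC =====
-- Pre_ excludes exactly the inputs on which A's `assert split_indice[0] == 0` raises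
-- AssertionError: a non-empty token list whose first token is not a depth-0 clause boundary.
def Pre_split_into_clauses (sql : String) : Prop :=
  ∀ t ∈ (PySem.Str.split₀ sql).take 1,
    clsTokens.any (fun tt => PySem.Str.isIn tt t) = true ∧
    (if PySem.Str.isIn "(" t then (1 : Int) else 0) = (if PySem.Str.isIn ")" t then (1 : Int) else 0)
instance (sql : String) : Decidable (Pre_split_into_clauses sql) := by
  unfold Pre_split_into_clauses; infer_instance

def pvWitness_split_into_clauses : String := "SELECT a FROM b"

def Spec_split_into_clauses (sql : String) (out : String × String × String × String × String) : Prop := out = split_into_clauses_alt sql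
instance (sql : String) (out : String × String × String × String × String) : Decidable (Spec_split_into_clauses sql out) := by unfold Spec_split_into_clauses; infer_instance

-- ===== CLAIM (what is proved, stated in full; the proofs are below) =====
def Claim_equal_split_into_clauses : Prop := ∀ (sql : String), Dom_split_into_clauses sql → Pre_split_into_clauses sql → Spec_split_into_clauses sql (split_into_clauses sql)

-- ===== LEMMAS AND PROOFS =====

-- A's flush step (what aClauseLoop does at each index)
def aFlush (toks : List String) (r : R5) (start fin : Nat) : R5 :=
  aAssign r (toks.getD start "")
    (PySem.Str.join " " (PySem.List.slice toks (some (start : Int)) (some (fin : Int))))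

-- canonical single pass both ports fuse into: mirrors aIndexLoop's depth updates and
-- flushes the finished segment at each later depth-0 boundary
def sLoop (toks : List String) : List String → Nat → Int → Nat → R5 → Nat × R5
  | [], _, _, start, r => (start, r)
  | t :: ts, idx, lb, start, r =>
    let lb := if PySem.Str.isIn "(" t then lb + 1 else lb
    let lb := if PySem.Str.isIn ")" t then lb - 1 else lb
    if clsTokens.any (fun tt => PySem.Str.isIn tt t) && (lb == 0) then
      sLoop toks ts (idx + 1) lb idx (aFlush toks r start idx)
    else sLoop toks ts (idx + 1) lb start r

-- pure (acc-free) form of bLabelLoop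
def labP : List String → Int → Int → List Int
  | [], _, _ => []
  | t :: ts, depth, seg =>
    let depth := depth + (if PySem.Str.isIn "(" t then (1 : Int) else 0)
                       - (if PySem.Str.isIn ")" t then (1 : Int) else 0)
    let seg := if (depth == 0) && clsTokens.any (fun k => PySem.Str.isIn k t) then seg + 1 else seg
    seg :: labP ts depth seg

-- stages 1+2 fused into one recursion over the tokens
def comb : List String → Int → Int → PySem.Dict Int (List String) → PySem.Dict Int (List String)
  | [], _, _, d => d
  | t :: ts, depth, seg, d =>
    let depth := depth + (if PySem.Str.isIn "(" t then (1 : Int) else 0)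
                       - (if PySem.Str.isIn ")" t then (1 : Int) else 0)
    let seg := if (depth == 0) && clsTokens.any (fun k => PySem.Str.isIn k t) then seg + 1 else seg
    comb ts depth seg (d.insert seg (d.getD seg [] ++ [t]))

-- the association list {0: segs[0], 1: segs[1], …} (keys i, i+1, …)
def zrAux : Int → List (List String) → List (Int × List String)
  | _, [] => []
  | i, s :: ss => (i, s) :: zrAux (i + 1) ss

lemma aIndexLoop_acc (ts : List String) : ∀ (idx : Nat) (lb : Int) (acc : List Nat),
    aIndexLoop ts idx lb acc = acc ++ aIndexLoop ts idx lb [] := by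
  induction ts with
  | nil => intro idx lb acc; simp [aIndexLoop]
  | cons t ts ih =>
    intro idx lb acc
    simp only [aIndexLoop]
    set l1 := if PySem.Str.isIn "(" t = true then lb + 1 else lb with h1
    set l2 := if PySem.Str.isIn ")" t = true then l1 - 1 else l1 with h2
    by_cases hc : ((clsTokens.any fun tt => PySem.Str.isIn tt t) && (l2 == 0)) = true
    · simp only [hc, if_true]
      rw [ih, ih _ _ ([] ++ [idx])]
      simp
    · simp only [hc]
      exact ih _ _ _

lemma bLabelLoop_acc (ts : List String) : ∀ (depth seg : Int) (acc : List Int),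
    bLabelLoop ts depth seg acc = acc ++ labP ts depth seg := by
  induction ts with
  | nil => intro depth seg acc; simp [bLabelLoop, labP]
  | cons t ts ih =>
    intro depth seg acc
    simp only [bLabelLoop, labP]
    rw [ih]
    simp

lemma fuse12 (ts : List String) : ∀ (depth seg : Int) (d : PySem.Dict Int (List String)),
    bGroupLoop (ts.zip (labP ts depth seg)) d = comb ts depth seg d := by
  induction ts with
  | nil => intro depth seg d; simp [labP, bGroupLoop, comb]
  | cons t ts ih =>
    intro depth seg d
    simp only [labP, comb, List.zip_cons_cons, bGroupLoop]
    exact ih _ _ _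

lemma zrAux_append : ∀ (segs : List (List String)) (i : Int) (v : List String),
    zrAux i (segs ++ [v]) = zrAux i segs ++ [(i + segs.length, v)] := by
  intro segs
  induction segs with
  | nil => intro i v; simp [zrAux]
  | cons s ss ih =>
    intro i v
    simp only [List.cons_append, zrAux, ih (i + 1) v, List.length_cons]
    push_cast
    ring_nf

lemma zr_get?_snoc : ∀ (ss : List (List String)) (i : Int) (cur : List String),
    (PySem.Dict.mk (zrAux i (ss ++ [cur]))).get? (i + ss.length) = some cur := by
  intro ss
  induction ss with
  | nil => intro i cur; simp [zrAux, PySem.Dict.get?_mk_cons]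
  | cons s ss ih =>
    intro i cur
    simp only [List.cons_append, zrAux, PySem.Dict.get?_mk_cons]
    have hne : (i == i + (↑((s :: ss).length) : Int)) = false := by
      simp only [List.length_cons]
      have : i ≠ i + ((ss.length : Int) + 1) := by omega
      push_cast
      simpa using by omega
    rw [List.length_cons]
    have h2 : i + ((ss.length : Int) + 1) = (i + 1) + ss.length := by ring
    push_cast
    rw [show i + ((ss.length : Int) + 1) = (i + 1) + (ss.length : Int) by ring]
    have hif : (i == (i + 1) + (ss.length : Int)) = false := by
      simpa using by omega
    rw [hif]
    simp only [Bool.false_eq_true, if_false]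
    exact ih (i + 1) cur

lemma zr_get?_end : ∀ (segs : List (List String)) (i : Int),
    (PySem.Dict.mk (zrAux i segs)).get? (i + segs.length) = none := by
  intro segs
  induction segs with
  | nil =>
    intro i
    simp [zrAux, PySem.Dict.get?]
  | cons s ss ih =>
    intro i
    simp only [zrAux, PySem.Dict.get?_mk_cons, List.length_cons]
    push_cast
    have hif : (i == i + ((ss.length : Int) + 1)) = false := by
      simpa using by omega
    rw [hif]
    simp only [Bool.false_eq_true, if_false]
    rw [show i + ((ss.length : Int) + 1) = (i + 1) + (ss.length : Int) by ring]
    exact ih (i + 1)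

lemma zr_map_snoc : ∀ (ss : List (List String)) (i : Int) (cur v : List String),
    (zrAux i (ss ++ [cur])).map
        (fun p => if p.1 == i + (ss.length : Int) then (i + (ss.length : Int), v) else p)
      = zrAux i (ss ++ [v]) := by
  intro ss
  induction ss with
  | nil => intro i cur v; simp [zrAux]
  | cons s ss ih =>
    intro i cur v
    simp only [List.cons_append, zrAux, List.map_cons, List.length_cons]
    push_cast
    have hif : (i == i + ((ss.length : Int) + 1)) = false := by
      simpa using by omega
    rw [hif]
    simp only [Bool.false_eq_true, if_false]
    rw [show i + ((ss.length : Int) + 1) = (i + 1) + (ss.length : Int) by ring]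
    rw [ih (i + 1) cur v]

lemma zr_insert_snoc (ss : List (List String)) (i : Int) (cur v : List String) :
    (PySem.Dict.mk (zrAux i (ss ++ [cur]))).insert (i + ss.length) v
      = PySem.Dict.mk (zrAux i (ss ++ [v])) := by
  have hc : (PySem.Dict.mk (zrAux i (ss ++ [cur]))).contains (i + ss.length) = true := by
    rw [PySem.Dict.contains_eq_isSome_get?, zr_get?_snoc]
    rfl
  simp only [PySem.Dict.insert, hc, if_true]
  exact congrArg PySem.Dict.mk (zr_map_snoc ss i cur v)

lemma zr_insert_end (segs : List (List String)) (i : Int) (v : List String) :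
    (PySem.Dict.mk (zrAux i segs)).insert (i + segs.length) v
      = PySem.Dict.mk (zrAux i (segs ++ [v])) := by
  have hc : (PySem.Dict.mk (zrAux i segs)).contains (i + segs.length) = false := by
    rw [PySem.Dict.contains_eq_isSome_get?, zr_get?_end]
    rfl
  simp only [PySem.Dict.insert, hc, Bool.false_eq_true, if_false]
  rw [zrAux_append]

lemma zr_values : ∀ (segs : List (List String)) (i : Int),
    (PySem.Dict.mk (zrAux i segs)).values = segs := by
  intro segs
  induction segs with
  | nil => intro i; simp [zrAux, PySem.Dict.values]
  | cons s ss ih =>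
    intro i
    simp only [zrAux, PySem.Dict.values, List.map_cons]
    have := ih (i + 1)
    simp only [PySem.Dict.values] at this
    rw [this]

lemma bValuesLoop_append : ∀ (xs ys : List (List String)) (r : R5),
    bValuesLoop (xs ++ ys) r = bValuesLoop ys (bValuesLoop xs r) := by
  intro xs
  induction xs with
  | nil => intro ys r; simp [bValuesLoop]
  | cons x xs ih => intro ys r; simp only [List.cons_append, bValuesLoop]; exact ih _ _

lemma bSlot_eq_aAssign (r : R5) (g : List String) :
    bSlotLoop clsTokens 0 r g
      = aAssign r ((PySem.List.pyGet? g 0).getD "") (PySem.Str.join " " g) := by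
  simp only [clsTokens, bSlotLoop, setSlot, aAssign]

lemma slice_head (toks : List String) (s f : Nat) (h1 : s < f) (h2 : s < toks.length) :
    (PySem.List.pyGet? (PySem.List.slice toks (some (s : Int)) (some (f : Int))) 0).getD ""
      = toks.getD s "" := by
  rw [PySem.List.slice_natCast]
  obtain ⟨k, hk⟩ : ∃ k, f - s = k + 1 := ⟨f - s - 1, by omega⟩
  rw [hk, List.drop_eq_getElem_cons h2, List.take_succ_cons]
  simp [PySem.List.pyGet?, PySem.List.pyIdx?, List.getD_eq_getElem?_getD,
    List.getElem?_eq_getElem h2]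

lemma flush_eq (toks : List String) (r : R5) (s f : Nat) (h1 : s < f) (h2 : s < toks.length) :
    bSlotLoop clsTokens 0 r (PySem.List.slice toks (some (s : Int)) (some (f : Int)))
      = aFlush toks r s f := by
  rw [bSlot_eq_aAssign, slice_head toks s f h1 h2, aFlush]

lemma slice_singleton (toks : List String) (i : Nat) (h : i < toks.length) :
    PySem.List.slice toks (some (i : Int)) (some ((i + 1 : Nat) : Int)) = [toks.getD i ""] := by
  rw [PySem.List.slice_natCast]
  have : i + 1 - i = 1 := by omega
  rw [this, List.drop_eq_getElem_cons h, List.take_succ_cons, List.take_zero]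
  simp [List.getD_eq_getElem?_getD, List.getElem?_eq_getElem h]

lemma slice_snoc (toks : List String) (s i : Nat) (h1 : s ≤ i) (h2 : i < toks.length) :
    PySem.List.slice toks (some (s : Int)) (some (i : Int)) ++ [toks.getD i ""]
      = PySem.List.slice toks (some (s : Int)) (some ((i + 1 : Nat) : Int)) := by
  rw [PySem.List.slice_natCast, PySem.List.slice_natCast]
  have h3 : i + 1 - s = (i - s) + 1 := by omega
  rw [h3, List.take_add_one]
  have h4 : (toks.drop s)[i - s]? = some toks[i] := by
    rw [List.getElem?_drop]
    have : s + (i - s) = i := by omega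
    rw [this, List.getElem?_eq_getElem h2]
  rw [h4]
  simp [List.getD_eq_getElem?_getD, List.getElem?_eq_getElem h2]

lemma depth_step (lb : Int) (p q : Bool) :
    (if q then (if p then lb + 1 else lb) - 1 else (if p then lb + 1 else lb))
      = lb + (if p then (1 : Int) else 0) - (if q then (1 : Int) else 0) := by
  cases p <;> cases q <;> simp

-- A's two loops fuse into the canonical single pass
lemma A_fusion (toks : List String) (ts : List String) :
    ∀ (idx : Nat) (lb : Int) (start : Nat) (r : R5) (tail : List Nat),
    aClauseLoop toks (aIndexLoop ts idx lb [] ++ tail) start r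
      = aClauseLoop toks tail (sLoop toks ts idx lb start r).1 (sLoop toks ts idx lb start r).2 := by
  induction ts with
  | nil => intro idx lb start r tail; simp [aIndexLoop, sLoop]
  | cons t ts ih =>
    intro idx lb start r tail
    simp only [aIndexLoop]
    simp only [sLoop]
    set l1 := if PySem.Str.isIn "(" t = true then lb + 1 else lb with h1
    set l2 := if PySem.Str.isIn ")" t = true then l1 - 1 else l1 with h2
    by_cases hc : ((clsTokens.any fun tt => PySem.Str.isIn tt t) && (l2 == 0)) = true
    · simp only [hc, if_true]
      rw [aIndexLoop_acc]
      simp only [List.nil_append, List.singleton_append]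
      exact ih (idx + 1) l2 idx (aFlush toks r start idx) tail
    · simp only [hc, Bool.false_eq_true, if_false]
      exact ih (idx + 1) l2 start r tail

-- B's fused grouping pass equals the canonical single pass followed by the final flush
lemma main_fusion (toks : List String) : ∀ (ts : List String) (idx start : Nat) (depth : Int)
    (ss : List (List String)) (r : R5),
    ts = toks.drop idx → start < idx → idx ≤ toks.length →
    bValuesLoop (PySem.Dict.values (comb ts depth (ss.length : Int)
        (PySem.Dict.mk (zrAux 0 (ss ++ [PySem.List.slice toks (some (start : Int)) (some (idx : Int))]))))) r
      = aFlush toks (sLoop toks ts idx depth start (bValuesLoop ss r)).2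
          (sLoop toks ts idx depth start (bValuesLoop ss r)).1 toks.length := by
  intro ts
  induction ts with
  | nil =>
    intro idx start depth ss r hts hsi hil
    have hidx : idx = toks.length := by
      have := List.drop_eq_nil_iff.mp hts.symm
      omega
    subst hidx
    simp only [comb, sLoop, zr_values]
    rw [bValuesLoop_append]
    simp only [bValuesLoop]
    rw [flush_eq toks _ start toks.length hsi (by omega)]
  | cons t ts ih =>
    intro idx start depth ss r hts hsi hil
    have hlt : idx < toks.length := by
      by_contra h
      rw [List.drop_eq_nil_iff.mpr (by omega)] at hts
      exact List.cons_ne_nil t ts hts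
    have hget : toks.getD idx "" = t := by
      have h0 : (toks.drop idx)[0]? = some t := by rw [← hts]; rfl
      rw [List.getElem?_drop, Nat.add_zero] at h0
      simp [List.getD_eq_getElem?_getD, h0]
    have hts' : ts = toks.drop (idx + 1) := by
      have := congrArg List.tail hts
      simpa [List.tail_drop] using this
    simp only [comb, sLoop]
    rw [depth_step depth (PySem.Str.isIn "(" t) (PySem.Str.isIn ")" t)]
    set d2 := depth + (if PySem.Str.isIn "(" t = true then (1 : Int) else 0)
                    - (if PySem.Str.isIn ")" t = true then (1 : Int) else 0) with hd2
    by_cases hc : ((d2 == 0) && clsTokens.any fun k => PySem.Str.isIn k t) = true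
    · have hc' : ((clsTokens.any fun tt => PySem.Str.isIn tt t) && (d2 == 0)) = true := by
        rw [Bool.and_comm]; exact hc
      simp only [hc, hc', if_true]
      -- new segment: dict gains a fresh key ss.length + 1 holding [t]
      have hgd : (PySem.Dict.mk (zrAux 0 (ss ++ [PySem.List.slice toks (some (start : Int)) (some (idx : Int))]))).getD ((ss.length : Int) + 1) [] = [] := by
        rw [PySem.Dict.getD_eq_get?_getD]
        have := zr_get?_end (ss ++ [PySem.List.slice toks (some (start : Int)) (some (idx : Int))]) 0
        simp only [List.length_append, List.length_cons, List.length_nil, zero_add] at this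
        rw [show ((ss.length : Int) + 1) = ((ss.length + 1 : Nat) : Int) by push_cast; ring]
        rw [this]
        rfl
      rw [hgd]
      have hins := zr_insert_end (ss ++ [PySem.List.slice toks (some (start : Int)) (some (idx : Int))]) 0 [t]
      simp only [List.length_append, List.length_cons, List.length_nil, zero_add] at hins
      rw [show ((ss.length : Int) + 1) = ((ss.length + 1 : Nat) : Int) by push_cast; ring]
      simp only [List.nil_append]
      rw [hins]
      have hsg : [t] = PySem.List.slice toks (some (idx : Int)) (some ((idx + 1 : Nat) : Int)) := by
        rw [slice_singleton toks idx hlt, hget]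
      rw [hsg]
      have hlen : ((ss.length + 1 : Nat) : Int) = (((ss ++ [PySem.List.slice toks (some (start : Int)) (some (idx : Int))]).length : Nat) : Int) := by
        simp
      rw [hlen]
      rw [ih (idx + 1) idx d2 (ss ++ [PySem.List.slice toks (some (start : Int)) (some (idx : Int))]) r hts' (by omega) (by omega)]
      rw [bValuesLoop_append]
      simp only [bValuesLoop]
      rw [flush_eq toks _ start idx hsi (by omega)]
    · have hc' : ((clsTokens.any fun tt => PySem.Str.isIn tt t) && (d2 == 0)) = false := by
        rw [Bool.and_comm]; exact Bool.eq_false_iff.mpr (fun h => hc h)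
      simp only [hc, hc', Bool.false_eq_true, if_false]
      -- same segment: the last dict entry grows by t
      have hgd : (PySem.Dict.mk (zrAux 0 (ss ++ [PySem.List.slice toks (some (start : Int)) (some (idx : Int))]))).getD (ss.length : Int) [] = PySem.List.slice toks (some (start : Int)) (some (idx : Int)) := by
        rw [PySem.Dict.getD_eq_get?_getD]
        have := zr_get?_snoc ss 0 (PySem.List.slice toks (some (start : Int)) (some (idx : Int)))
        rw [zero_add] at this
        rw [this]
        rfl
      rw [hgd]
      have hins := zr_insert_snoc ss 0 (PySem.List.slice toks (some (start : Int)) (some (idx : Int)))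
        (PySem.List.slice toks (some (start : Int)) (some (idx : Int)) ++ [t])
      rw [zero_add] at hins
      rw [hins]
      rw [show PySem.List.slice toks (some (start : Int)) (some (idx : Int)) ++ [t]
            = PySem.List.slice toks (some (start : Int)) (some ((idx + 1 : Nat) : Int)) by
        rw [← hget, slice_snoc toks start idx (by omega) hlt]]
      exact ih (idx + 1) start d2 ss r hts' (by omega) (by omega)

-- ===== VERDICT (by name: the statement is the Claim_ definition above) =====
theorem split_into_clauses_spec : Claim_equal_split_into_clauses := by
  intro sql _ hpre
  unfold Spec_split_into_clauses split_into_clauses split_into_clauses_alt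
  rcases h : PySem.Str.split₀ sql with _ | ⟨t0, ts0⟩
  · simp [aIndexLoop, aClauseLoop, bLabelLoop, bGroupLoop, bValuesLoop, PySem.Dict.values]
  · unfold Pre_split_into_clauses at hpre
    rw [h] at hpre
    obtain ⟨hcls, hpar⟩ := hpre t0 (by simp)
    -- A side
    simp only [aIndexLoop]
    rw [depth_step 0 (PySem.Str.isIn "(" t0) (PySem.Str.isIn ")" t0)]
    have hz0 : (0 : Int) + (if PySem.Str.isIn "(" t0 = true then (1 : Int) else 0)
        - (if PySem.Str.isIn ")" t0 = true then (1 : Int) else 0) = 0 := by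
      rw [hpar]; ring
    rw [hz0]
    have hcA : ((clsTokens.any fun tt => PySem.Str.isIn tt t0) && ((0 : Int) == 0)) = true := by
      rw [hcls]; rfl
    simp only [hcA, if_true]
    rw [aIndexLoop_acc]
    simp only [List.nil_append, List.cons_append, List.drop_succ_cons, List.drop_zero]
    rw [A_fusion (t0 :: ts0) ts0 1 0 0 ("", "", "", "", "") [(t0 :: ts0).length]]
    -- B side
    rw [bLabelLoop_acc, List.nil_append, fuse12]
    simp only [comb]
    have hd0 : (0 : Int) + (if PySem.Str.isIn "(" t0 = true then (1 : Int) else 0)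
        - (if PySem.Str.isIn ")" t0 = true then (1 : Int) else 0) = 0 := by
      rw [hpar]; ring
    rw [hd0]
    have hcB : (((0 : Int) == 0) && clsTokens.any fun k => PySem.Str.isIn k t0) = true := by
      rw [hcls]; rfl
    simp only [hcB, if_true]
    have hins0 : (PySem.Dict.mk ([] : List (Int × List String))).insert ((-1 : Int) + 1)
        ((PySem.Dict.mk ([] : List (Int × List String))).getD ((-1 : Int) + 1) [] ++ [t0])
        = PySem.Dict.mk (zrAux 0 ([] ++ [[t0]])) := by
      simp [PySem.Dict.insert, PySem.Dict.contains, PySem.Dict.getD, PySem.Dict.get?, zrAux]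
    rw [hins0]
    have hsg : [t0] = PySem.List.slice (t0 :: ts0) (some ((0 : Nat) : Int)) (some ((1 : Nat) : Int)) := by
      rw [PySem.List.slice_natCast]; rfl
    rw [hsg]
    rw [show ((-1 : Int) + 1) = ((List.length ([] : List (List String)) : Nat) : Int) by simp]
    rw [main_fusion (t0 :: ts0) ts0 1 0 0 [] ("", "", "", "", "") rfl (by omega) (by simp)]
    rfl
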